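-- pv_equiv track=rewrite | github.com/metminwi/HvM | game/ai/engines/engine_engine.py | _candidate_moves
-- ===== SOURCE A (Python) =====
-- from typing import Dict, List, Optional, Tuple
--
-- def _in_bounds(n: int, r: int, c: int) -> bool:
--     return 0 <= r < n and 0 <= c < n
--
-- def _has_any_stone(board: List[List[int]]) -> bool:
--     return any(v != 0 for row in board for v in row)
--
-- def _candidate_moves(board: List[List[int]], k: int = 18, radius: int = 2) -> List[Tuple[int, int]]:
--     """
--     Reduce branching: consider empty cells near existing stones.
--     If board is empty -> play center.
--     """
--     n = len(board)
--     if not _has_any_stone(board):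
--         center = n // 2
--         return [(center, center)]
--
--     candidates = set()
--     for r in range(n):
--         for c in range(n):
--             if board[r][c] != 0:
--                 for dr in range(-radius, radius + 1):
--                     for dc in range(-radius, radius + 1):
--                         rr, cc = r + dr, c + dc
--                         if _in_bounds(n, rr, cc) and board[rr][cc] == 0:
--                             candidates.add((rr, cc))
--
--     cand = list(candidates)
--     # If too many, sample deterministically-ish by sorting then taking k
--     cand.sort(key=lambda x: (abs(x[0] - n // 2) + abs(x[1] - n // 2), x[0], x[1]))
--     return cand[:k] if len(cand) > k else cand
-- ===== SOURCE B (Python) =====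
-- from typing import List, Tuple
--
-- def _candidate_moves(board: List[List[int]], k: int = 18, radius: int = 2) -> List[Tuple[int, int]]:
--     """Gather per empty cell against a stone list instead of scattering from each stone."""
--     n = len(board)
--     if all(v == 0 for row in board for v in row):
--         center = n // 2
--         return [(center, center)]
--     stones = [(r, c) for r in range(n) for c in range(n) if board[r][c] != 0]
--     cand = [(r, c)
--             for r in range(n) for c in range(n)
--             if board[r][c] == 0
--             and any(abs(r - sr) <= radius and abs(c - sc) <= radius for sr, sc in stones)]
--     cand.sort(key=lambda x: (abs(x[0] - n // 2) + abs(x[1] - n // 2), x[0], x[1]))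
--     return cand[:k]
-- ===== Notes on version B (the rewrite author's own statement) =====
-- stated objective: faster
-- what changed: A scatters from every stone over its whole (2*radius+1)^2 neighborhood box into a dedup set; B builds the stone list once and gathers: it tests each empty cell directly for a stone within Chebyshev distance radius, needing no set, then applies the same sort key and an unconditional [:k] truncation.
import Mathlib
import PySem

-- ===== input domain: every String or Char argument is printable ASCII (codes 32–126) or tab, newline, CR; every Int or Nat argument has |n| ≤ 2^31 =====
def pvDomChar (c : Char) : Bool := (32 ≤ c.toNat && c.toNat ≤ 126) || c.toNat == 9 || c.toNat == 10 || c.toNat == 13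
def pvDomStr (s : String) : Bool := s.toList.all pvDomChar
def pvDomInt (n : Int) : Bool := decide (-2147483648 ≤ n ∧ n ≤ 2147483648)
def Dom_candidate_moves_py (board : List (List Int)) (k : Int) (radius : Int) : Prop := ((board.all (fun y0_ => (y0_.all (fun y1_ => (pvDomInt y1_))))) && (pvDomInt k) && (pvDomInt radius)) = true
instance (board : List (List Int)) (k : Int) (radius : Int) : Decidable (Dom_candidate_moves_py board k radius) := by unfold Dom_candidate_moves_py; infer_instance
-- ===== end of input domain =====

-- B replaces A's scatter from each stone over its (2*radius+1)^2 box into a dedup set by a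
-- gather: one pass collecting the stone list, one pass testing each empty cell against that
-- list by Chebyshev distance (no set needed), then the same sort key and truncation.

-- ===== PORT A =====
-- board[r][c]; both Pythons index only with 0 ≤ r,c < n (Pre_ makes the default unreachable)
def pvCellD (board : List (List Int)) (r c : Int) : Int :=
  PySem.List.pyGetD (PySem.List.pyGetD board r []) c 0

-- the key lambda x: (abs(x[0]-n//2)+abs(x[1]-n//2), x[0], x[1]); Python compares tuples lexicographically
def pvKey (n : Nat) (x : Int × Int) : Int ×ₗ Int ×ₗ Int :=
  toLex (|x.1 - ((n / 2 : Nat) : Int)| + |x.2 - ((n / 2 : Nat) : Int)|, toLex (x.1, x.2))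

def pvInBounds (n : Nat) (r c : Int) : Bool :=
  decide (0 ≤ r ∧ r < (n : Int) ∧ 0 ≤ c ∧ c < (n : Int))

def pvHasAnyStone (board : List (List Int)) : Bool :=
  board.any (fun row => row.any (fun v => v ≠ 0))

-- A's nested stone-scatter loops building the set `candidates`
def pvCandA (board : List (List Int)) (radius : Int) : List (Int × Int) :=
  (List.range board.length).foldl (fun s (r : Nat) =>
    (List.range board.length).foldl (fun s (c : Nat) =>
      if pvCellD board (r : Int) (c : Int) ≠ 0 then
        (PySem.List.pyRange (-radius) (radius + 1) 1).foldl (fun s (dr : Int) =>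
          (PySem.List.pyRange (-radius) (radius + 1) 1).foldl (fun s (dc : Int) =>
            if pvInBounds board.length ((r : Int) + dr) ((c : Int) + dc) ∧
                pvCellD board ((r : Int) + dr) ((c : Int) + dc) = 0 then
              PySem.Set.add s ((r : Int) + dr, (c : Int) + dc)
            else s) s) s
      else s) s) PySem.Set.empty

def candidate_moves_py (board : List (List Int)) (k : Int) (radius : Int) : List (Int × Int) :=
  let n := board.length
  if !pvHasAnyStone board then
    [(((n / 2 : Nat) : Int), ((n / 2 : Nat) : Int))]
  else
    let cand := PySem.List.sorted (pvCandA board radius) (pvKey n) false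
    if (cand.length : Int) > k then PySem.List.slice cand none (some k) else cand

-- ===== PORT B =====
-- B's stone-list comprehension
def pvStones (board : List (List Int)) : List (Int × Int) :=
  (List.range board.length).flatMap (fun (r : Nat) =>
    ((List.range board.length).filter (fun (c : Nat) => pvCellD board (r : Int) (c : Int) ≠ 0)).map
      (fun (c : Nat) => ((r : Int), (c : Int))))

-- B's gather comprehension: empty cells having some stone within Chebyshev distance radius
def pvCandB (board : List (List Int)) (radius : Int) : List (Int × Int) :=
  (List.range board.length).flatMap (fun (r : Nat) =>
    ((List.range board.length).filter (fun (c : Nat) =>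
      pvCellD board (r : Int) (c : Int) = 0 ∧
      (pvStones board).any (fun s =>
        |(r : Int) - s.1| ≤ radius ∧ |(c : Int) - s.2| ≤ radius))).map
      (fun (c : Nat) => ((r : Int), (c : Int))))

def candidate_moves_py_alt (board : List (List Int)) (k : Int) (radius : Int) : List (Int × Int) :=
  let n := board.length
  if board.all (fun row => row.all (fun v => v == 0)) then
    [(((n / 2 : Nat) : Int), ((n / 2 : Nat) : Int))]
  else
    PySem.List.slice (PySem.List.sorted (pvCandB board radius) (pvKey n) false) none (some k)

-- ===== PRECONDITION & SPEC =====
-- A raises IndexError exactly when some stone exists and some row is shorter than len(board);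
-- Pre_ is A's non-raising domain: every row at least len(board) long, or the board entirely zero.
def Pre_candidate_moves_py (board : List (List Int)) (k : Int) (radius : Int) : Prop :=
  (∀ row ∈ board, board.length ≤ row.length) ∨ (∀ row ∈ board, ∀ v ∈ row, v = 0)
instance (board : List (List Int)) (k : Int) (radius : Int) : Decidable (Pre_candidate_moves_py board k radius) := by unfold Pre_candidate_moves_py; infer_instance

def pvWitness_candidate_moves_py : List (List Int) × Int × Int := ([[1, 0], [0, 0]], 18, 2)

def Spec_candidate_moves_py (board : List (List Int)) (k : Int) (radius : Int) (out : List (Int × Int)) : Prop := out = candidate_moves_py_alt board k radius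
instance (board : List (List Int)) (k : Int) (radius : Int) (out : List (Int × Int)) : Decidable (Spec_candidate_moves_py board k radius out) := by unfold Spec_candidate_moves_py; infer_instance

-- ===== CLAIM (what is proved, stated in full; the proofs are below) =====
def Claim_equal_candidate_moves_py : Prop := ∀ (board : List (List Int)) (k : Int) (radius : Int), Dom_candidate_moves_py board k radius → Pre_candidate_moves_py board k radius → Spec_candidate_moves_py board k radius (candidate_moves_py board k radius)

-- ===== LEMMAS AND PROOFS =====

theorem candidate_moves_py_witness_ok :
    Dom_candidate_moves_py pvWitness_candidate_moves_py.1 pvWitness_candidate_moves_py.2.1 pvWitness_candidate_moves_py.2.2 ∧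
    Pre_candidate_moves_py pvWitness_candidate_moves_py.1 pvWitness_candidate_moves_py.2.1 pvWitness_candidate_moves_py.2.2 := by
  decide

theorem pv_mem_foldl {α β : Type} (f : List β → α → List β) (Q : α → β → Prop)
    (h : ∀ s x a, a ∈ f s x ↔ a ∈ s ∨ Q x a) :
    ∀ (l : List α) (s : List β) (a : β), a ∈ l.foldl f s ↔ a ∈ s ∨ ∃ x ∈ l, Q x a := by
  intro l
  induction l with
  | nil => simp
  | cons y t ih =>
      intro s a
      simp only [List.foldl_cons, ih, h, List.mem_cons]
      constructor
      · rintro ((hs | hq) | ⟨x, hx, hq⟩)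
        · exact Or.inl hs
        · exact Or.inr ⟨y, Or.inl rfl, hq⟩
        · exact Or.inr ⟨x, Or.inr hx, hq⟩
      · rintro (hs | ⟨x, (rfl | hx), hq⟩)
        · exact Or.inl (Or.inl hs)
        · exact Or.inl (Or.inr hq)
        · exact Or.inr ⟨x, hx, hq⟩

theorem pv_nodup_foldl {α β : Type} (f : List β → α → List β)
    (h : ∀ s x, s.Nodup → (f s x).Nodup) :
    ∀ (l : List α) (s : List β), s.Nodup → (l.foldl f s).Nodup := by
  intro l
  induction l with
  | nil => exact fun s hs => hs
  | cons y t ih => intro s hs; exact ih _ (h s y hs)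

theorem pv_step (s : List (Int × Int)) (p : Prop) [Decidable p] (y a : Int × Int) :
    a ∈ (if p then PySem.Set.add s y else s) ↔ a ∈ s ∨ (p ∧ a = y) := by
  split_ifs with hc <;> simp [PySem.Set.mem_add, hc]

theorem pv_mem_candA (board : List (List Int)) (radius : Int) (a : Int × Int) :
    a ∈ pvCandA board radius ↔
      ∃ r ∈ List.range board.length, ∃ c ∈ List.range board.length,
        pvCellD board (r : Int) (c : Int) ≠ 0 ∧
        ∃ dr ∈ PySem.List.pyRange (-radius) (radius + 1) 1,
          ∃ dc ∈ PySem.List.pyRange (-radius) (radius + 1) 1,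
            (pvInBounds board.length ((r : Int) + dr) ((c : Int) + dc) ∧
              pvCellD board ((r : Int) + dr) ((c : Int) + dc) = 0) ∧
            a = ((r : Int) + dr, (c : Int) + dc) := by
  have h4 : ∀ (r c : Nat) (dr : Int) (s : List (Int × Int)) (a : Int × Int),
      a ∈ (PySem.List.pyRange (-radius) (radius + 1) 1).foldl (fun s (dc : Int) =>
            if pvInBounds board.length ((r : Int) + dr) ((c : Int) + dc) ∧
                pvCellD board ((r : Int) + dr) ((c : Int) + dc) = 0 then
              PySem.Set.add s ((r : Int) + dr, (c : Int) + dc)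
            else s) s ↔
        a ∈ s ∨ ∃ dc ∈ PySem.List.pyRange (-radius) (radius + 1) 1,
          (pvInBounds board.length ((r : Int) + dr) ((c : Int) + dc) ∧
            pvCellD board ((r : Int) + dr) ((c : Int) + dc) = 0) ∧
          a = ((r : Int) + dr, (c : Int) + dc) :=
    fun r c dr s a =>
      pv_mem_foldl _
        (Q := fun (dc : Int) a =>
          (pvInBounds board.length ((r : Int) + dr) ((c : Int) + dc) ∧
            pvCellD board ((r : Int) + dr) ((c : Int) + dc) = 0) ∧
          a = ((r : Int) + dr, (c : Int) + dc))
        (fun s dc a => pv_step s _ _ a) _ s a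
  have h3 : ∀ (r c : Nat) (s : List (Int × Int)) (a : Int × Int),
      a ∈ (PySem.List.pyRange (-radius) (radius + 1) 1).foldl (fun s (dr : Int) =>
            (PySem.List.pyRange (-radius) (radius + 1) 1).foldl (fun s (dc : Int) =>
              if pvInBounds board.length ((r : Int) + dr) ((c : Int) + dc) ∧
                  pvCellD board ((r : Int) + dr) ((c : Int) + dc) = 0 then
                PySem.Set.add s ((r : Int) + dr, (c : Int) + dc)
              else s) s) s ↔
        a ∈ s ∨ ∃ dr ∈ PySem.List.pyRange (-radius) (radius + 1) 1,
          ∃ dc ∈ PySem.List.pyRange (-radius) (radius + 1) 1,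
            (pvInBounds board.length ((r : Int) + dr) ((c : Int) + dc) ∧
              pvCellD board ((r : Int) + dr) ((c : Int) + dc) = 0) ∧
            a = ((r : Int) + dr, (c : Int) + dc) :=
    fun r c s a =>
      pv_mem_foldl _ _ (fun s dr a => h4 r c dr s a) _ s a
  have h2 : ∀ (r : Nat) (s : List (Int × Int)) (a : Int × Int),
      a ∈ (List.range board.length).foldl (fun s (c : Nat) =>
            if pvCellD board (r : Int) (c : Int) ≠ 0 then
              (PySem.List.pyRange (-radius) (radius + 1) 1).foldl (fun s (dr : Int) =>
                (PySem.List.pyRange (-radius) (radius + 1) 1).foldl (fun s (dc : Int) =>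
                  if pvInBounds board.length ((r : Int) + dr) ((c : Int) + dc) ∧
                      pvCellD board ((r : Int) + dr) ((c : Int) + dc) = 0 then
                    PySem.Set.add s ((r : Int) + dr, (c : Int) + dc)
                  else s) s) s
            else s) s ↔
        a ∈ s ∨ ∃ c ∈ List.range board.length,
          pvCellD board (r : Int) (c : Int) ≠ 0 ∧
          ∃ dr ∈ PySem.List.pyRange (-radius) (radius + 1) 1,
            ∃ dc ∈ PySem.List.pyRange (-radius) (radius + 1) 1,
              (pvInBounds board.length ((r : Int) + dr) ((c : Int) + dc) ∧
                pvCellD board ((r : Int) + dr) ((c : Int) + dc) = 0) ∧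
              a = ((r : Int) + dr, (c : Int) + dc) := by
    intro r s a
    refine pv_mem_foldl _
      (Q := fun (c : Nat) a =>
        pvCellD board (r : Int) (c : Int) ≠ 0 ∧
        ∃ dr ∈ PySem.List.pyRange (-radius) (radius + 1) 1,
          ∃ dc ∈ PySem.List.pyRange (-radius) (radius + 1) 1,
            (pvInBounds board.length ((r : Int) + dr) ((c : Int) + dc) ∧
              pvCellD board ((r : Int) + dr) ((c : Int) + dc) = 0) ∧
            a = ((r : Int) + dr, (c : Int) + dc))
      (fun s c a => ?_) _ s a
    dsimp only
    split_ifs with hc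
    · rw [h3 r c s a]; simp [hc]
    · simp [hc]
  refine (pv_mem_foldl _
    (Q := fun (r : Nat) a =>
      ∃ c ∈ List.range board.length,
        pvCellD board (r : Int) (c : Int) ≠ 0 ∧
        ∃ dr ∈ PySem.List.pyRange (-radius) (radius + 1) 1,
          ∃ dc ∈ PySem.List.pyRange (-radius) (radius + 1) 1,
            (pvInBounds board.length ((r : Int) + dr) ((c : Int) + dc) ∧
              pvCellD board ((r : Int) + dr) ((c : Int) + dc) = 0) ∧
            a = ((r : Int) + dr, (c : Int) + dc))
    (fun s r a => h2 r s a) _ PySem.Set.empty a).trans ?_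
  simp [PySem.Set.empty]

theorem pv_mem_stones (board : List (List Int)) (a : Int × Int) :
    a ∈ pvStones board ↔
      ∃ r ∈ List.range board.length, ∃ c ∈ List.range board.length,
        pvCellD board (r : Int) (c : Int) ≠ 0 ∧ a = ((r : Int), (c : Int)) := by
  simp only [pvStones, List.mem_flatMap, List.mem_map, List.mem_filter, decide_eq_true_eq]
  constructor
  · rintro ⟨r, hr, c, ⟨hc, h0⟩, rfl⟩
    exact ⟨r, hr, c, hc, h0, rfl⟩
  · rintro ⟨r, hr, c, hc, h0, rfl⟩
    exact ⟨r, hr, c, ⟨hc, h0⟩, rfl⟩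

theorem pv_mem_candB (board : List (List Int)) (radius : Int) (a : Int × Int) :
    a ∈ pvCandB board radius ↔
      ∃ r ∈ List.range board.length, ∃ c ∈ List.range board.length,
        (pvCellD board (r : Int) (c : Int) = 0 ∧
          ∃ s ∈ pvStones board, |(r : Int) - s.1| ≤ radius ∧ |(c : Int) - s.2| ≤ radius) ∧
        a = ((r : Int), (c : Int)) := by
  simp only [pvCandB, List.mem_flatMap, List.mem_map, List.mem_filter, decide_eq_true_eq,
    List.any_eq_true]
  constructor
  · rintro ⟨r, hr, c, ⟨hc, h0, hs⟩, rfl⟩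
    exact ⟨r, hr, c, hc, ⟨h0, hs⟩, rfl⟩
  · rintro ⟨r, hr, c, hc, ⟨h0, hs⟩, rfl⟩
    exact ⟨r, hr, c, ⟨hc, h0, hs⟩, rfl⟩

theorem pv_nodup_candA (board : List (List Int)) (radius : Int) :
    (pvCandA board radius).Nodup := by
  unfold pvCandA
  refine pv_nodup_foldl _ (fun s r hs => ?_) _ _ (by simp [PySem.Set.empty])
  refine pv_nodup_foldl _ (fun s c hs => ?_) _ _ hs
  dsimp only
  split_ifs with hc
  · refine pv_nodup_foldl _ (fun s dr hs => ?_) _ _ hs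
    refine pv_nodup_foldl _ (fun s dc hs => ?_) _ _ hs
    dsimp only
    split_ifs with h
    · exact PySem.Set.nodup_add _ _ hs
    · exact hs
  · exact hs

theorem pv_nodup_candB (board : List (List Int)) (radius : Int) :
    (pvCandB board radius).Nodup := by
  unfold pvCandB
  rw [List.nodup_flatMap]
  constructor
  · intro r _
    refine List.Nodup.map ?_ (List.Nodup.filter _ (List.nodup_range))
    intro c1 c2 h
    have := congrArg Prod.snd h
    simp only at this
    exact_mod_cast this
  · refine List.Pairwise.imp ?_ (List.pairwise_lt_range)
    intro r1 r2 hlt a h1 h2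
    simp only [List.mem_map, List.mem_filter] at h1 h2
    obtain ⟨c1, _, rfl⟩ := h1
    obtain ⟨c2, _, he⟩ := h2
    have := congrArg Prod.fst he
    simp only at this
    have : r2 = r1 := by exact_mod_cast this
    omega

theorem pvKey_injective (n : Nat) : Function.Injective (pvKey n) := by
  intro x y hxy
  unfold pvKey at hxy
  have h2 := toLex.injective hxy
  have h3 : toLex (x.1, x.2) = toLex (y.1, y.2) := congrArg Prod.snd h2
  have h4 : (x.1, x.2) = (y.1, y.2) := toLex.injective h3
  exact Prod.ext (congrArg Prod.fst h4) (congrArg Prod.snd h4)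

theorem pv_memAB (board : List (List Int)) (radius : Int) (a : Int × Int) :
    a ∈ pvCandA board radius ↔ a ∈ pvCandB board radius := by
  rw [pv_mem_candA, pv_mem_candB]
  constructor
  · rintro ⟨r, hr, c, hc, hne, dr, hdr, dc, hdc, ⟨hib, h0⟩, rfl⟩
    rw [List.mem_range] at hr hc
    rw [PySem.List.mem_pyRange_one] at hdr hdc
    have hib' : 0 ≤ (r : Int) + dr ∧ (r : Int) + dr < (board.length : Int) ∧
        0 ≤ (c : Int) + dc ∧ (c : Int) + dc < (board.length : Int) := by
      simpa [pvInBounds] using hib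
    refine ⟨((r : Int) + dr).toNat, by rw [List.mem_range]; omega,
      ((c : Int) + dc).toNat, by rw [List.mem_range]; omega, ⟨?_, ?_⟩, ?_⟩
    · have e1 : ((((r : Int) + dr).toNat : Int)) = (r : Int) + dr := by omega
      have e2 : ((((c : Int) + dc).toNat : Int)) = (c : Int) + dc := by omega
      rw [e1, e2]; exact h0
    · refine ⟨((r : Int), (c : Int)), ?_, ?_, ?_⟩
      · rw [pv_mem_stones]
        exact ⟨r, by rw [List.mem_range]; omega, c, by rw [List.mem_range]; omega, hne, rfl⟩
      · have e1 : ((((r : Int) + dr).toNat : Int)) = (r : Int) + dr := by omega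
        rw [e1]
        have : (r : Int) + dr - (r : Int) = dr := by ring
        rw [this]
        exact abs_le.mpr ⟨by omega, by omega⟩
      · have e2 : ((((c : Int) + dc).toNat : Int)) = (c : Int) + dc := by omega
        rw [e2]
        have : (c : Int) + dc - (c : Int) = dc := by ring
        rw [this]
        exact abs_le.mpr ⟨by omega, by omega⟩
    · have e1 : ((((r : Int) + dr).toNat : Int)) = (r : Int) + dr := by omega
      have e2 : ((((c : Int) + dc).toNat : Int)) = (c : Int) + dc := by omega
      rw [e1, e2]
  · rintro ⟨r, hr, c, hc, ⟨h0, x, hx, hd1, hd2⟩, rfl⟩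
    rw [List.mem_range] at hr hc
    rw [pv_mem_stones] at hx
    obtain ⟨sr, hsr, sc, hsc, hne, rfl⟩ := hx
    rw [List.mem_range] at hsr hsc
    have hd1' := abs_le.mp hd1
    have hd2' := abs_le.mp hd2
    refine ⟨sr, by rw [List.mem_range]; omega, sc, by rw [List.mem_range]; omega, hne,
      (r : Int) - (sr : Int), ?_, (c : Int) - (sc : Int), ?_, ⟨?_, ?_⟩, ?_⟩
    · rw [PySem.List.mem_pyRange_one]; simp only at hd1'; omega
    · rw [PySem.List.mem_pyRange_one]; simp only at hd2'; omega
    · have e1 : (sr : Int) + ((r : Int) - (sr : Int)) = (r : Int) := by ring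
      have e2 : (sc : Int) + ((c : Int) - (sc : Int)) = (c : Int) := by ring
      rw [e1, e2]
      simp [pvInBounds]; omega
    · have e1 : (sr : Int) + ((r : Int) - (sr : Int)) = (r : Int) := by ring
      have e2 : (sc : Int) + ((c : Int) - (sc : Int)) = (c : Int) := by ring
      rw [e1, e2]; exact h0
    · have e1 : (sr : Int) + ((r : Int) - (sr : Int)) = (r : Int) := by ring
      have e2 : (sc : Int) + ((c : Int) - (sc : Int)) = (c : Int) := by ring
      rw [e1, e2]

theorem pv_sorted_eq (board : List (List Int)) (radius : Int) :
    PySem.List.sorted (pvCandA board radius) (pvKey board.length) false =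
    PySem.List.sorted (pvCandB board radius) (pvKey board.length) false := by
  refine PySem.List.sorted_eq_sorted_of_perm _ _ _ (pvKey_injective _) ?_
  rw [List.perm_ext_iff_of_nodup (pv_nodup_candA board radius) (pv_nodup_candB board radius)]
  exact pv_memAB board radius

theorem pv_slice_all {L : List (Int × Int)} {k : Int} (h : ¬ ((L.length : Int) > k)) :
    PySem.List.slice L none (some k) = L := by
  have hk : 0 ≤ k := le_trans (by positivity) (not_lt.mp h)
  rw [PySem.List.slice_to _ hk]
  exact List.take_of_length_le (by omega)

theorem pv_guard (board : List (List Int)) :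
    (!pvHasAnyStone board) = board.all (fun row => row.all (fun v => v == 0)) := by
  rw [Bool.eq_iff_iff]
  simp [pvHasAnyStone, List.any_eq_true, List.all_eq_true]


-- ===== VERDICT (by name: the statement is the Claim_ definition above) =====
theorem candidate_moves_py_spec : Claim_equal_candidate_moves_py := by
  intro board k radius _ _
  unfold Spec_candidate_moves_py candidate_moves_py candidate_moves_py_alt
  simp only
  rw [← pv_guard]
  by_cases hg : pvHasAnyStone board = true
  · simp only [hg, Bool.not_true, Bool.false_eq_true, if_false]
    rw [pv_sorted_eq]
    split_ifs with hlen
    · rfl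
    · rw [pv_slice_all hlen]
  · simp only [Bool.not_eq_true] at hg
    simp only [hg, Bool.not_false, if_true]
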